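-- pv_equiv track=rewrite | github.com/tbonest3ak5/aoc-2025 | day_6/d6q2.py | num_from_col
-- ===== SOURCE A (Python) =====
-- def num_from_col(number_lines, col):
--     acc = 0
--     exp = 0
--     for i in range(len(number_lines)-1, -1, -1):
--         ch = number_lines[i][col]
--         if ch != ' ':
--             dig = int(ch)
--             acc += dig * (10 ** exp)
--             exp += 1
--
--     return acc
-- ===== SOURCE B (Python) =====
-- def num_from_col(number_lines, col):
--     acc = 0
--     for line in number_lines:
--         ch = line[col]
--         if ch != ' ':
--             acc = acc * 10 + int(ch)
--     return acc
-- ===== Notes on version B (the rewrite author's own statement) =====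
-- stated objective: simpler
-- what changed: Replaces A's bottom-up reversed index loop with an (acc, exp) pair and explicit 10**exp place-value arithmetic by a single top-down Horner pass (acc = acc*10 + digit) directly over the lines.
import Mathlib
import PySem

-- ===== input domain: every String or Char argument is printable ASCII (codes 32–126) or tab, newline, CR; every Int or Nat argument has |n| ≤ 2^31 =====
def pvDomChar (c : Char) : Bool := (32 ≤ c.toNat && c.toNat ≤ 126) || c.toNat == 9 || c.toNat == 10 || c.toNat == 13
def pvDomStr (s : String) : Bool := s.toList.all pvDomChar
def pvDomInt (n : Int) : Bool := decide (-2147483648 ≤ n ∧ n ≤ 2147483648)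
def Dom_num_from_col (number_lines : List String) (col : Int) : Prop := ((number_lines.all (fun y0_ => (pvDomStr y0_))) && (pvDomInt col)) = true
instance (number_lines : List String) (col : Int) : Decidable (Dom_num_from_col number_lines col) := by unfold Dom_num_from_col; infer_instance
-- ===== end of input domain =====

-- B replaces A's bottom-up reversed index loop with 10**exp place values by a single
-- top-down Horner pass (acc = acc*10 + digit); objective: simpler.

-- ===== PORT A =====
def num_from_col (number_lines : List String) (col : Int) : Int :=
  ((PySem.List.pyRange (PySem.List.len number_lines - 1) (-1) (-1)).foldl
    (fun (st : Int × Int) i =>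
      let ch : Char := (PySem.Str.pyGet? (PySem.List.pyGetD number_lines i "") col).getD ' '
      if ch ≠ ' ' then
        (st.1 + (PySem.Int.ofChars? [ch]).getD 0 * 10 ^ st.2.toNat, st.2 + 1)
      else st)
    (0, 0)).1

-- ===== PORT B =====
def num_from_col_alt (number_lines : List String) (col : Int) : Int :=
  number_lines.foldl
    (fun acc line =>
      let ch : Char := (PySem.Str.pyGet? line col).getD ' '
      if ch ≠ ' ' then acc * 10 + (PySem.Int.ofChars? [ch]).getD 0 else acc)
    0

-- ===== PRECONDITION & SPEC =====
-- Pre_ excludes exactly the inputs where Python A raises: col out of range for some line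
-- (IndexError) or a non-space, non-digit character in the column (ValueError from int(ch)).
def Pre_num_from_col (number_lines : List String) (col : Int) : Prop :=
  ∀ s ∈ number_lines, PySem.Raise.InRange s.toList.length col ∧
    (((PySem.Str.pyGet? s col).getD ' ') = ' ' ∨
      PySem.Chars.isdigit ((PySem.Str.pyGet? s col).getD ' ') = true)
instance (number_lines : List String) (col : Int) : Decidable (Pre_num_from_col number_lines col) := by
  unfold Pre_num_from_col; infer_instance

def pvWitness_num_from_col : List String × Int := (["12", " 4", "30"], 1)

def Spec_num_from_col (number_lines : List String) (col : Int) (out : Int) : Prop := out = num_from_col_alt number_lines col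
instance (number_lines : List String) (col : Int) (out : Int) : Decidable (Spec_num_from_col number_lines col out) := by unfold Spec_num_from_col; infer_instance

-- ===== CLAIM (what is proved, stated in full; the proofs are below) =====
def Claim_equal_num_from_col : Prop := ∀ (number_lines : List String) (col : Int), Dom_num_from_col number_lines col → Pre_num_from_col number_lines col → Spec_num_from_col number_lines col (num_from_col number_lines col)

-- ===== LEMMAS AND PROOFS =====

-- A's loop body / B's loop body on the extracted column character
def pvStepA (st : Int × Int) (c : Char) : Int × Int :=
  if c ≠ ' ' then (st.1 + (PySem.Int.ofChars? [c]).getD 0 * 10 ^ st.2.toNat, st.2 + 1) else st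

def pvStepB (a : Int) (c : Char) : Int :=
  if c ≠ ' ' then a * 10 + (PySem.Int.ofChars? [c]).getD 0 else a

-- A's bottom-up (acc, exp) accumulation equals Horner evaluation of the reversed list.
lemma pvFoldA_eq (rs : List Char) (a e : Int) (he : 0 ≤ e) :
    (rs.foldl pvStepA (a, e)).1 = a + (rs.reverse.foldl pvStepB 0) * 10 ^ e.toNat := by
  induction rs generalizing a e with
  | nil => simp
  | cons c t ih =>
    by_cases hc : c = ' '
    · subst hc
      simp only [List.foldl_cons, pvStepA, List.reverse_cons, List.foldl_append,
        List.foldl_cons, List.foldl_nil, pvStepB]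
      simp [ih a e he]
    · simp only [List.foldl_cons, List.reverse_cons, List.foldl_append, List.foldl_nil]
      rw [show pvStepA (a, e) c
            = (a + (PySem.Int.ofChars? [c]).getD 0 * 10 ^ e.toNat, e + 1) from by
          simp [pvStepA, hc]]
      rw [ih _ (e + 1) (by omega)]
      rw [show pvStepB (List.foldl pvStepB 0 t.reverse) c
            = (List.foldl pvStepB 0 t.reverse) * 10 + (PySem.Int.ofChars? [c]).getD 0 from by
          simp [pvStepB, hc]]
      have ht : (e + 1).toNat = e.toNat + 1 := by omega
      rw [ht, pow_succ]
      ring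

lemma pvFoldB_map (nl : List String) (col : Int) :
    num_from_col_alt nl col
      = (nl.map (fun s => (PySem.Str.pyGet? s col).getD ' ')).foldl pvStepB 0 := by
  rw [num_from_col_alt, List.foldl_map]
  rfl

theorem num_from_col_eq_alt (nl : List String) (col : Int) :
    num_from_col nl col = num_from_col_alt nl col := by
  rw [num_from_col]
  have hrange : PySem.List.pyRange (PySem.List.len nl - 1) (-1) (-1)
      = (PySem.List.pyRange 0 (PySem.List.len nl) 1).reverse := by
    have := PySem.List.pyRange_neg_one_eq_reverse (PySem.List.len nl - 1) (-1)
    simpa using this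
  rw [hrange]
  have hbody : ((PySem.List.pyRange 0 (PySem.List.len nl) 1).reverse.foldl
      (fun (st : Int × Int) i =>
        let ch : Char := (PySem.Str.pyGet? (PySem.List.pyGetD nl i "") col).getD ' '
        if ch ≠ ' ' then
          (st.1 + (PySem.Int.ofChars? [ch]).getD 0 * 10 ^ st.2.toNat, st.2 + 1)
        else st) (0, 0))
      = (((PySem.List.pyRange 0 (PySem.List.len nl) 1).reverse.map
          (fun i => (PySem.Str.pyGet? (PySem.List.pyGetD nl i "") col).getD ' ')).foldl
          pvStepA (0, 0)) := by
    rw [List.foldl_map]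
    rfl
  rw [hbody]
  have hmap : (PySem.List.pyRange 0 (PySem.List.len nl) 1).map
      (fun i => (PySem.Str.pyGet? (PySem.List.pyGetD nl i "") col).getD ' ')
      = nl.map (fun s => (PySem.Str.pyGet? s col).getD ' ') := by
    have h1 : (PySem.List.pyRange 0 (PySem.List.len nl) 1).map
        (fun i => PySem.List.pyGetD nl i "") = nl := by
      simpa using PySem.List.map_pyGetD_pyRange_zero nl ""
    rw [show (fun i => (PySem.Str.pyGet? (PySem.List.pyGetD nl i "") col).getD ' ')
          = (fun s => (PySem.Str.pyGet? s col).getD ' ')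
              ∘ (fun i => PySem.List.pyGetD nl i "") from rfl,
        ← List.map_map, h1]
  rw [List.map_reverse, hmap, pvFoldA_eq _ 0 0 le_rfl, List.reverse_reverse,
    pvFoldB_map]
  simp

-- ===== VERDICT (by name: the statement is the Claim_ definition above) =====
theorem num_from_col_spec : Claim_equal_num_from_col := by
  intro nl col _ _
  unfold Spec_num_from_col
  exact num_from_col_eq_alt nl col
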